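-- pv_equiv track=rewrite | github.com/veryfansome/germ | bot/train/tokenizer.py | tokenize_chars_and_labels
-- ===== SOURCE A (Python) =====
-- def tokenize_chars_and_labels(sentence_tokens):
--     """
--     For a single sentence (list of tokens), return:
--       - list of characters (flattened across tokens)
--       - list of B/I/E/S tags (aligned with each character)
--     """
--     chars = []
--     labels = []
--
--     for token in sentence_tokens:
--         if len(token) == 1:
--             # Single-character token => label is S
--             chars.append(token[0])
--             labels.append("S")
--         else:
--             # Multi-character token
--             token_len = len(token)
--             for idx, c in enumerate(token):
--                 if idx == 0:
--                     chars.append(c)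
--                     labels.append("B")
--                 elif idx == token_len - 1:
--                     chars.append(c)
--                     labels.append("E")
--                 else:
--                     chars.append(c)
--                     labels.append("I")
--     return chars, labels
-- ===== SOURCE B (Python) =====
-- def tokenize_chars_and_labels(sentence_tokens):
--     text = "".join(sentence_tokens)
--     starts = set()
--     lasts = set()
--     pos = 0
--     for token in sentence_tokens:
--         if token:
--             starts.add(pos)
--             lasts.add(pos + len(token) - 1)
--             pos += len(token)
--     labels = []
--     for i in range(len(text)):
--         if i in starts:
--             labels.append("S" if i in lasts else "B")
--         elif i in lasts:
--             labels.append("E")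
--         else:
--             labels.append("I")
--     return list(text), labels
-- ===== Notes on version B (the rewrite author's own statement) =====
-- stated objective: alternative
-- what changed: Instead of A's per-character enumerate loop branching on idx==0 / idx==len-1 inside each token, B joins the tokens into one flat text, builds two sets of global boundary offsets (token starts and token last characters) from cumulative lengths, and labels each global index by membership in those sets.
import Mathlib
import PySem

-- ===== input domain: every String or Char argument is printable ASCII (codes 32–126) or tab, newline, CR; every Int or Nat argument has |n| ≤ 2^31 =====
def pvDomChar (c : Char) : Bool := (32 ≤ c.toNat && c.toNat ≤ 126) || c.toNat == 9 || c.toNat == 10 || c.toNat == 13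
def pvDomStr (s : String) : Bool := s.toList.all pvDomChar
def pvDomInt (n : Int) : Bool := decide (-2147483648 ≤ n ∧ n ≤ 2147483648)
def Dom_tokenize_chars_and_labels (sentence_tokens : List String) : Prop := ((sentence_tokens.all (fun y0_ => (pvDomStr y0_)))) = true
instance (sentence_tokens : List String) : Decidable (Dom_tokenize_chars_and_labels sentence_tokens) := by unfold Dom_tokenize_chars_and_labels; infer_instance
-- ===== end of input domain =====

-- B replaces A's per-character index-branching loop by a boundary-set algorithm: join the tokens
-- into one flat text, collect token start/last offsets into two sets, then label each global index
-- by set membership (objective: alternative — a different data structure, same cost).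

-- ===== PORT A =====
-- Literal port of A: fold over tokens; single-char branch, else an enumerate loop branching on idx.
-- token[0] under the len==1 guard is the first character, as a 1-char string (tl.headI; in range there).
def tokenize_chars_and_labels (sentence_tokens : List String) : List String × List String :=
  sentence_tokens.foldl
    (fun acc token =>
      let tl := token.toList
      if tl.length = 1 then
        (acc.1 ++ [String.singleton tl.headI], acc.2 ++ ["S"])
      else
        let token_len : Int := tl.length
        (PySem.List.enumerate tl 0).foldl
          (fun acc2 p =>
            if p.1 = 0 then (acc2.1 ++ [String.singleton p.2], acc2.2 ++ ["B"])
            else if p.1 = token_len - 1 then (acc2.1 ++ [String.singleton p.2], acc2.2 ++ ["E"])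
            else (acc2.1 ++ [String.singleton p.2], acc2.2 ++ ["I"]))
          acc)
    ([], [])

-- ===== PORT B =====
-- Port of Source B: text = "".join(tokens); two PySem.Sets of start / last offsets built by one fold
-- with a running position; labels = one pass over range(len(text)) testing set membership.
def tokenize_chars_and_labels_alt (sentence_tokens : List String) : List String × List String :=
  let text := sentence_tokens.flatMap String.toList
  let fin := sentence_tokens.foldl
    (fun (a : PySem.Set Int × PySem.Set Int × Int) token =>
      if token.toList ≠ [] then
        (a.1.add a.2.2,
         (a.2.1.add (a.2.2 + (token.toList.length : Int) - 1),
          a.2.2 + (token.toList.length : Int)))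
      else a)
    (PySem.Set.empty, PySem.Set.empty, 0)
  let labels := (PySem.List.pyRange 0 (text.length : Int) 1).map (fun i =>
    if fin.1.contains i then (if fin.2.1.contains i then "S" else "B")
    else if fin.2.1.contains i then "E" else "I")
  (text.map String.singleton, labels)

-- ===== PRECONDITION & SPEC =====
def Spec_tokenize_chars_and_labels (sentence_tokens : List String) (out : List String × List String) : Prop := out = tokenize_chars_and_labels_alt sentence_tokens
instance (sentence_tokens : List String) (out : List String × List String) : Decidable (Spec_tokenize_chars_and_labels sentence_tokens out) := by unfold Spec_tokenize_chars_and_labels; infer_instance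

-- ===== CLAIM (what is proved, stated in full; the proofs are below) =====
def Claim_equal_tokenize_chars_and_labels : Prop := ∀ (sentence_tokens : List String), Dom_tokenize_chars_and_labels sentence_tokens → Spec_tokenize_chars_and_labels sentence_tokens (tokenize_chars_and_labels sentence_tokens)

-- ===== LEMMAS AND PROOFS =====

-- Proof-side closed form both programs are reduced to: per-token B/I/E/S label segment.
def pvSegment (n : Nat) : List String :=
  if n = 0 then []
  else if n = 1 then ["S"]
  else ["B"] ++ List.replicate (n - 2) "I" ++ ["E"]

-- Proof-side spec of B's two sets: start offsets / last-char offsets of nonempty tokens from pos p.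
def pvSOffs : List String → Int → List Int
  | [], _ => []
  | t :: ts, p =>
    if t.toList = [] then pvSOffs ts p else p :: pvSOffs ts (p + t.toList.length)

def pvEOffs : List String → Int → List Int
  | [], _ => []
  | t :: ts, p =>
    if t.toList = [] then pvEOffs ts p
    else (p + t.toList.length - 1) :: pvEOffs ts (p + t.toList.length)

def pvTot (ts : List String) : Int := ((ts.map (fun t => t.toList.length)).sum : Nat)

-- ---------- A-side: A equals the flatMap-of-segments closed form ----------

theorem pv_innerFold (n : Int) (tl : List Char) (s : Int) (acc : List String × List String) :
    (PySem.List.enumerate tl s).foldl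
      (fun acc2 p =>
        if p.1 = 0 then (acc2.1 ++ [String.singleton p.2], acc2.2 ++ ["B"])
        else if p.1 = n - 1 then (acc2.1 ++ [String.singleton p.2], acc2.2 ++ ["E"])
        else (acc2.1 ++ [String.singleton p.2], acc2.2 ++ ["I"]))
      acc
    = (acc.1 ++ tl.map String.singleton,
       acc.2 ++ (PySem.List.enumerate tl s).map
         (fun p => if p.1 = 0 then "B" else if p.1 = n - 1 then "E" else "I")) := by
  induction tl generalizing s acc with
  | nil => simp [PySem.List.enumerate_nil]
  | cons x xs ih =>
    rw [PySem.List.enumerate_cons]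
    simp only [List.foldl_cons, List.map_cons, ih]
    split_ifs <;> simp

theorem pv_tailMap (n : Int) (xs : List Char) (s : Int)
    (h1 : 1 ≤ s) (h2 : s + xs.length = n) (hne : xs ≠ []) :
    (PySem.List.enumerate xs s).map
      (fun p => if p.1 = 0 then "B" else if p.1 = n - 1 then "E" else "I")
    = List.replicate (n - 1 - s).toNat "I" ++ ["E"] := by
  induction xs generalizing s with
  | nil => exact absurd rfl hne
  | cons y ys ih =>
    rw [PySem.List.enumerate_cons]
    cases ys with
    | nil =>
      simp only [List.length_cons, List.length_nil] at h2
      have hse : s = n - 1 := by omega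
      have hzt : (n - 1 - s).toNat = 0 := by omega
      have hn1 : ¬ (n - 1 = 0) := by omega
      simp [PySem.List.enumerate_nil, hse, hn1]
    | cons z zs =>
      have hlen : (1 : Int) + (z :: zs).length ≤ n - s := by
        simp at h2 ⊢; omega
      have hs0 : ¬ (s = 0) := by omega
      have hse : ¬ (s = n - 1) := by
        simp [List.length_cons] at hlen; omega
      rw [List.map_cons, ih (s + 1) (by omega) (by simp at h2 ⊢; omega) (by simp)]
      have : (n - 1 - s).toNat = (n - 1 - (s + 1)).toNat + 1 := by
        simp [List.length_cons] at hlen; omega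
      simp [hs0, hse, this, List.replicate_succ]

theorem pv_labels_eq (tl : List Char) (h : tl.length ≠ 1) :
    (PySem.List.enumerate tl 0).map
      (fun p => if p.1 = 0 then "B" else if p.1 = (tl.length : Int) - 1 then "E" else "I")
    = pvSegment tl.length := by
  cases tl with
  | nil => simp [PySem.List.enumerate_nil, pvSegment]
  | cons x xs =>
    have hxs : xs ≠ [] := by
      intro hx; apply h; simp [hx]
    rw [PySem.List.enumerate_cons]
    rw [List.map_cons]
    simp only [zero_add]
    rw [pv_tailMap ((x :: xs).length : Int) xs 1 (by omega) (by simp; omega) hxs]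
    simp [pvSegment, hxs]

theorem pv_step (acc : List String × List String) (token : String) :
    (let tl := token.toList
     if tl.length = 1 then
       (acc.1 ++ [String.singleton tl.headI], acc.2 ++ ["S"])
     else
       let token_len : Int := tl.length
       (PySem.List.enumerate tl 0).foldl
         (fun acc2 p =>
           if p.1 = 0 then (acc2.1 ++ [String.singleton p.2], acc2.2 ++ ["B"])
           else if p.1 = token_len - 1 then (acc2.1 ++ [String.singleton p.2], acc2.2 ++ ["E"])
           else (acc2.1 ++ [String.singleton p.2], acc2.2 ++ ["I"]))
         acc)
    = (acc.1 ++ token.toList.map String.singleton,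
       acc.2 ++ pvSegment token.toList.length) := by
  by_cases h : token.toList.length = 1
  · obtain ⟨c, hc⟩ := List.length_eq_one_iff.mp h
    simp [hc, pvSegment]
  · simp only [h, if_false]
    rw [pv_innerFold, pv_labels_eq token.toList h]

theorem pv_outer (ts : List String) (acc : List String × List String) :
    ts.foldl
      (fun acc token =>
        let tl := token.toList
        if tl.length = 1 then
          (acc.1 ++ [String.singleton tl.headI], acc.2 ++ ["S"])
        else
          let token_len : Int := tl.length
          (PySem.List.enumerate tl 0).foldl
            (fun acc2 p =>
              if p.1 = 0 then (acc2.1 ++ [String.singleton p.2], acc2.2 ++ ["B"])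
              else if p.1 = token_len - 1 then (acc2.1 ++ [String.singleton p.2], acc2.2 ++ ["E"])
              else (acc2.1 ++ [String.singleton p.2], acc2.2 ++ ["I"]))
            acc)
      acc
    = (acc.1 ++ ts.flatMap (fun token => token.toList.map String.singleton),
       acc.2 ++ ts.flatMap (fun token => pvSegment token.toList.length)) := by
  induction ts generalizing acc with
  | nil => simp
  | cons t ts ih =>
    rw [List.foldl_cons, pv_step acc t, ih]
    simp [List.flatMap_cons]

-- ---------- B-side: B equals the same closed form ----------

-- Bounds on the offset lists.
theorem pv_sOffs_lb : ∀ (ts : List String) (p i : Int), i ∈ pvSOffs ts p → p ≤ i := by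
  intro ts
  induction ts with
  | nil => intro p i h; simp [pvSOffs] at h
  | cons t ts ih =>
    intro p i h
    by_cases ht : t.toList = []
    · rw [pvSOffs, if_pos ht] at h; exact ih _ _ h
    · rw [pvSOffs, if_neg ht, List.mem_cons] at h
      rcases h with h | h
      · omega
      · have := ih _ _ h; omega

theorem pv_eOffs_lb : ∀ (ts : List String) (p i : Int), i ∈ pvEOffs ts p → p ≤ i := by
  intro ts
  induction ts with
  | nil => intro p i h; simp [pvEOffs] at h
  | cons t ts ih =>
    intro p i h
    by_cases ht : t.toList = []
    · rw [pvEOffs, if_pos ht] at h; exact ih _ _ h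
    · rw [pvEOffs, if_neg ht, List.mem_cons] at h
      have hn : 1 ≤ (t.toList.length : Int) := by
        have := List.length_pos_iff.mpr ht; omega
      rcases h with h | h
      · omega
      · have := ih _ _ h; omega

-- B's fold builds exactly those offset sets and ends at position p + pvTot ts.
theorem pv_fold_spec (ts : List String) (S E : PySem.Set Int) (p : Int) :
    (∀ i, i ∈ (ts.foldl
        (fun (a : PySem.Set Int × PySem.Set Int × Int) token =>
          if token.toList ≠ [] then
            (a.1.add a.2.2,
             (a.2.1.add (a.2.2 + (token.toList.length : Int) - 1),
              a.2.2 + (token.toList.length : Int)))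
          else a) (S, E, p)).1 ↔ i ∈ S ∨ i ∈ pvSOffs ts p) ∧
    (∀ i, i ∈ (ts.foldl
        (fun (a : PySem.Set Int × PySem.Set Int × Int) token =>
          if token.toList ≠ [] then
            (a.1.add a.2.2,
             (a.2.1.add (a.2.2 + (token.toList.length : Int) - 1),
              a.2.2 + (token.toList.length : Int)))
          else a) (S, E, p)).2.1 ↔ i ∈ E ∨ i ∈ pvEOffs ts p) := by
  induction ts generalizing S E p with
  | nil => simp [pvSOffs, pvEOffs]
  | cons t ts ih =>
    by_cases ht : t.toList = []
    · simp only [List.foldl_cons, ht, ne_eq, not_true_eq_false, if_false]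
      refine ⟨fun i => ?_, fun i => ?_⟩
      · rw [(ih S E p).1 i, pvSOffs, if_pos ht]
      · rw [(ih S E p).2 i, pvEOffs, if_pos ht]
    · simp only [List.foldl_cons, ht, ne_eq, not_false_eq_true, if_true]
      refine ⟨fun i => ?_, fun i => ?_⟩
      · rw [(ih _ _ _).1 i, pvSOffs, if_neg ht, PySem.Set.mem_add]
        simp only [List.mem_cons]; tauto
      · rw [(ih _ _ _).2 i, pvEOffs, if_neg ht, PySem.Set.mem_add]
        simp only [List.mem_cons]; tauto

-- The label map over one token's index block, memberships reduced to endpoint tests.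
theorem pv_seg_map (n : Nat) (p : Int) (h : 1 ≤ n) :
    (PySem.List.pyRange p (p + n) 1).map
      (fun i => if i = p then (if i = p + n - 1 then "S" else "B")
                else if i = p + n - 1 then "E" else "I")
    = pvSegment n := by
  rcases Nat.lt_or_ge n 2 with h2 | h2
  · have hn1 : n = 1 := by omega
    subst hn1
    rw [show p + (1 : Nat) = p + 1 by push_cast; ring, PySem.List.pyRange_one_singleton]
    simp [pvSegment]
  · have hcons : PySem.List.pyRange p (p + n) 1
        = p :: PySem.List.pyRange (p + 1) (p + n) 1 := by
      exact PySem.List.pyRange_one_cons (show p < p + (n : Int) by omega)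
    have hsnoc : PySem.List.pyRange (p + 1) (p + n) 1
        = PySem.List.pyRange (p + 1) (p + n - 1) 1 ++ [p + n - 1] := by
      have hs := PySem.List.pyRange_one_succ_right
        (show p + 1 ≤ p + (n : Int) - 1 by omega)
      rw [show (p + (n : Int) - 1) + 1 = p + n by ring] at hs
      exact hs
    rw [hcons, List.map_cons, hsnoc, List.map_append]
    have hmid : (PySem.List.pyRange (p + 1) (p + n - 1) 1).map
        (fun i => if i = p then (if i = p + n - 1 then "S" else "B")
                  else if i = p + n - 1 then "E" else "I")
        = List.replicate (n - 2) "I" := by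
      rw [List.map_congr_left (g := fun _ => "I") (fun i hi => by
          rw [PySem.List.mem_pyRange_one] at hi
          have h1 : ¬ (i = p) := by omega
          have h2' : ¬ (i = p + (n : Int) - 1) := by omega
          simp [h1, h2'])]
      rw [List.map_const']
      congr 1
      rw [PySem.List.length_pyRange_one]
      omega
    rw [hmid]
    have hp : ¬ (p = p + n - 1) := by omega
    have hlast : ¬ (p + (n : Int) - 1 = p) := by omega
    simp [pvSegment, hp, hlast, show ¬ (n = 0) by omega, show ¬ (n = 1) by omega]

-- The full label pass, done per token: membership in the global offset lists, restricted to
-- indices ≥ p, is membership in the suffix offset lists; the map splits into the segments.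
theorem pv_range_labels (ts : List String) (p : Int) (S E : List Int)
    (hS : ∀ i, p ≤ i → (i ∈ S ↔ i ∈ pvSOffs ts p))
    (hE : ∀ i, p ≤ i → (i ∈ E ↔ i ∈ pvEOffs ts p)) :
    (PySem.List.pyRange p (p + pvTot ts) 1).map
      (fun i => if i ∈ S then (if i ∈ E then "S" else "B")
                else if i ∈ E then "E" else "I")
    = ts.flatMap (fun t => pvSegment t.toList.length) := by
  induction ts generalizing p with
  | nil =>
    have h0 : pvTot ([] : List String) = 0 := rfl
    rw [h0, add_zero, PySem.List.pyRange_one_eq_nil le_rfl]; simp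
  | cons t ts ih =>
    by_cases ht : t.toList = []
    · have h0 : t.toList.length = 0 := by rw [ht]; rfl
      have htot : pvTot (t :: ts) = pvTot ts := by
        unfold pvTot; rw [List.map_cons, List.sum_cons, h0]; ring
      have hseg : pvSegment t.toList.length = [] := by rw [h0]; rfl
      rw [htot, List.flatMap_cons, hseg, List.nil_append]
      exact ih p (fun i hi => by rw [hS i hi, pvSOffs, if_pos ht])
        (fun i hi => by rw [hE i hi, pvEOffs, if_pos ht])
    · have hn : 1 ≤ t.toList.length := List.length_pos_iff.mpr ht
      have htot : pvTot (t :: ts) = (t.toList.length : Int) + pvTot ts := by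
        unfold pvTot; rw [List.map_cons, List.sum_cons]; push_cast; ring
      have hsplit : PySem.List.pyRange p (p + pvTot (t :: ts)) 1
          = PySem.List.pyRange p (p + t.toList.length) 1
            ++ PySem.List.pyRange (p + t.toList.length) (p + pvTot (t :: ts)) 1 := by
        apply PySem.List.pyRange_one_append
        · omega
        · have : (0 : Int) ≤ pvTot ts := by unfold pvTot; exact Int.natCast_nonneg _
          rw [htot]; omega
      rw [hsplit, List.map_append, List.flatMap_cons]
      congr 1
      · -- first block: only the endpoints p and p + n - 1 can be in the sets
        rw [List.map_congr_left (fun i hi => ?_), pv_seg_map t.toList.length p hn]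
        rw [PySem.List.mem_pyRange_one] at hi
        have hSi : (i ∈ S) = (i = p) := by
          rw [eq_iff_iff, hS i hi.1, pvSOffs, if_neg ht, List.mem_cons]
          constructor
          · rintro (h | h)
            · exact h
            · have := pv_sOffs_lb ts _ _ h; omega
          · exact fun h => Or.inl h
        have hEi : (i ∈ E) = (i = p + (t.toList.length : Int) - 1) := by
          rw [eq_iff_iff, hE i hi.1, pvEOffs, if_neg ht, List.mem_cons]
          constructor
          · rintro (h | h)
            · exact h
            · have := pv_eOffs_lb ts _ _ h; omega
          · exact fun h => Or.inl h
        simp only [hSi, hEi]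
      · -- tail: indices ≥ p + n, first offsets drop out
        have := ih (p + t.toList.length)
          (fun i hi => by
            rw [hS i (by omega), pvSOffs, if_neg ht, List.mem_cons]
            constructor
            · rintro (h | h)
              · omega
              · exact h
            · exact fun h => Or.inr h)
          (fun i hi => by
            rw [hE i (by omega), pvEOffs, if_neg ht, List.mem_cons]
            constructor
            · rintro (h | h)
              · omega
              · exact h
            · exact fun h => Or.inr h)
        rw [htot, show p + ((t.toList.length : Int) + pvTot ts)
              = (p + t.toList.length) + pvTot ts by ring]
        exact this

theorem pv_tot_eq (ts : List String) :
    pvTot ts = ((ts.flatMap String.toList).length : Int) := by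
  simp [pvTot, List.length_flatMap]

-- ===== VERDICT (by name: the statement is the Claim_ definition above) =====
theorem tokenize_chars_and_labels_spec : Claim_equal_tokenize_chars_and_labels := by
  intro ts _
  show tokenize_chars_and_labels ts = tokenize_chars_and_labels_alt ts
  rw [tokenize_chars_and_labels, pv_outer, tokenize_chars_and_labels_alt]
  simp only [List.nil_append]
  obtain ⟨hS, hE⟩ := pv_fold_spec ts PySem.Set.empty PySem.Set.empty 0
  refine Prod.ext ?_ ?_
  · simp [List.map_flatMap]
  · show ts.flatMap (fun token => pvSegment token.toList.length) = _
    have hfun : ∀ (S E : PySem.Set Int),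
        (fun i => if S.contains i then (if E.contains i then "S" else "B")
                  else if E.contains i then "E" else "I")
        = (fun i => if i ∈ S then (if i ∈ E then "S" else "B")
                    else if i ∈ E then "E" else "I") := by
      intro S E; funext i
      by_cases h1 : i ∈ S <;> by_cases h2 : i ∈ E <;>
        simp [h1, h2]
    rw [hfun]
    have hlen : ((ts.flatMap String.toList).length : Int) = 0 + pvTot ts := by
      rw [pv_tot_eq]; ring
    rw [hlen]
    exact (pv_range_labels ts 0 _ _
      (fun i _ => by rw [hS i]; simp [PySem.Set.empty])
      (fun i _ => by rw [hE i]; simp [PySem.Set.empty])).symm
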